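-- pv_equiv track=rewrite | github.com/KvaziDeveloper1703/CodeWars_Python | level_6/CW_6_10.py | count_repeated_characters
-- ===== SOURCE A (Python) =====
-- def count_repeated_characters(given_string):
--     given_string = given_string.lower()
--     char_count = {}
--
--     for char in given_string:
--         char_count[char] = char_count.get(char, 0) + 1
--
--     repeated_count = 0
--     for count in char_count.values():
--         if count > 1:
--             repeated_count += 1
--
--     return repeated_count
-- ===== SOURCE B (Python) =====
-- def count_repeated_characters(given_string):
--     seen = set()
--     repeated = set()
--     for char in given_string.lower():
--         if char in seen:
--             repeated.add(char)
--         else: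
--             seen.add(char)
--     return len(repeated)
-- ===== Notes on version B (the rewrite author's own statement) =====
-- stated objective: simpler
-- what changed: Replaces A's two-pass design (build a char-to-count dict, then a second loop filtering counts greater than 1) with a single pass over the lowercased string maintaining a set of characters seen once and a set of characters seen again; the counting and the whole second loop disappear.
import Mathlib
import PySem

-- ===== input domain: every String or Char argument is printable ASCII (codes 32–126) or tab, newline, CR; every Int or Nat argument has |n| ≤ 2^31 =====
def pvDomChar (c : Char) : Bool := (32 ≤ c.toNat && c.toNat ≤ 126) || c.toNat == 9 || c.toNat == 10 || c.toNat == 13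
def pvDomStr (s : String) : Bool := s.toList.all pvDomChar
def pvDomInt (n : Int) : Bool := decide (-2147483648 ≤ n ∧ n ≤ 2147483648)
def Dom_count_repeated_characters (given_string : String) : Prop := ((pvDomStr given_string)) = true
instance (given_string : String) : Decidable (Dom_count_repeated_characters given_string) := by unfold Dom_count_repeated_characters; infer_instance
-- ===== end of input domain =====

-- B replaces A's dict-of-counts plus second filtering loop with one pass over the
-- lowercased string maintaining 'seen'/'repeated' sets (objective: simpler).

-- ===== PORT A =====
def count_repeated_characters (given_string : String) : Int :=
  let gs := PySem.Str.lower given_string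
  let char_count : PySem.Dict Char Int :=
    gs.toList.foldl (fun d ch => d.insert ch (d.getD ch 0 + 1)) PySem.Dict.empty
  char_count.values.foldl (fun acc count => if count > 1 then acc + 1 else acc) 0

-- ===== PORT B =====
def count_repeated_characters_alt (given_string : String) : Int :=
  let st :=
    (PySem.Str.lower given_string).toList.foldl
      (fun (st : PySem.Set Char × PySem.Set Char) ch =>
        if PySem.Set.contains st.1 ch then (st.1, PySem.Set.add st.2 ch)
        else (PySem.Set.add st.1 ch, st.2))
      (PySem.Set.empty, PySem.Set.empty)
  PySem.Set.len st.2

-- ===== PRECONDITION & SPEC =====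
def Spec_count_repeated_characters (given_string : String) (out : Int) : Prop := out = count_repeated_characters_alt given_string
instance (given_string : String) (out : Int) : Decidable (Spec_count_repeated_characters given_string out) := by unfold Spec_count_repeated_characters; infer_instance

-- ===== CLAIM (what is proved, stated in full; the proofs are below) =====
def Claim_equal_count_repeated_characters : Prop := ∀ (given_string : String), Dom_count_repeated_characters given_string → Spec_count_repeated_characters given_string (count_repeated_characters given_string)

-- ===== LEMMAS AND PROOFS =====

-- the one-pass loop's step
def pvStep (st : PySem.Set Char × PySem.Set Char) (ch : Char) : PySem.Set Char × PySem.Set Char :=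
  if PySem.Set.contains st.1 ch then (st.1, PySem.Set.add st.2 ch)
  else (PySem.Set.add st.1 ch, st.2)

-- membership in the final 'repeated' accumulator
lemma pv_mem_final (l : List Char) (seen rep : PySem.Set Char) (c : Char) :
    c ∈ (l.foldl pvStep (seen, rep)).2 ↔
      c ∈ rep ∨ (c ∈ seen ∧ c ∈ l) ∨ 2 ≤ l.count c := by
  induction l generalizing seen rep with
  | nil => simp
  | cons x xs ih =>
    simp only [List.foldl_cons, pvStep]
    have hcount : c ∈ xs ↔ 1 ≤ xs.count c := by
      rw [← List.count_pos_iff]; omega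
    by_cases hx : x ∈ seen
    · rw [if_pos ((PySem.Set.contains_iff seen x).mpr hx)]
      rw [ih]
      by_cases hc : c = x
      · subst hc
        simp [hx, List.count_cons_self]
      · simp [PySem.Set.mem_add, hc, Ne.symm hc, List.mem_cons]
    · rw [if_neg (by rw [PySem.Set.contains_iff]; exact hx)]
      rw [ih]
      by_cases hc : c = x
      · subst hc
        simp [hx, List.count_cons_self]
        by_cases hr : c ∈ rep
        · simp [hr]
        · simp only [hr, false_or]
          rw [hcount]
          omega
      · simp [PySem.Set.mem_add, hc, Ne.symm hc, List.mem_cons]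

-- the final 'repeated' accumulator stays duplicate-free
lemma pv_nodup_final (l : List Char) (seen rep : PySem.Set Char) (h : rep.Nodup) :
    (l.foldl pvStep (seen, rep)).2.Nodup := by
  induction l generalizing seen rep with
  | nil => exact h
  | cons x xs ih =>
    simp only [List.foldl_cons, pvStep]
    split
    · exact ih _ _ (PySem.Set.nodup_add _ _ h)
    · exact ih _ _ h

-- A's value on the char list xs: number of distinct chars occurring more than once
lemma pv_A_eq (xs : List Char) :
    ((xs.foldl (fun d ch => d.insert ch (d.getD ch 0 + 1)) PySem.Dict.empty :
        PySem.Dict Char Int).values.foldl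
        (fun acc count => if count > 1 then acc + 1 else acc) 0)
      = (((PySem.Set.ofList xs).filter (fun c => 2 ≤ xs.count c)).length : Int) := by
  rw [PySem.Dict.foldl_insert_getD_add_one_eq_counter]
  rw [PySem.List.foldl_ite_add_one]
  have hv : (PySem.Dict.counter xs : PySem.Dict Char Int).values
      = (PySem.Set.ofList xs).map (fun k => (xs.count k : Int)) := by
    have := PySem.Dict.items_counter (xs := xs)
    simp only [PySem.Dict.values, this, List.map_map]
    rfl
  rw [hv, List.countP_map]
  have : ((PySem.Set.ofList xs).countP
      ((fun count => decide (count > 1)) ∘ fun k => (xs.count k : Int)))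
      = (PySem.Set.ofList xs).countP (fun c => decide (2 ≤ xs.count c)) := by
    apply List.countP_congr
    intro c _
    simp [Function.comp]
    omega
  rw [this, List.countP_eq_length_filter]
  simp

-- ===== VERDICT (by name: the statement is the Claim_ definition above) =====
theorem count_repeated_characters_spec : Claim_equal_count_repeated_characters := by
  intro s _
  unfold Spec_count_repeated_characters count_repeated_characters count_repeated_characters_alt
  set xs := (PySem.Str.lower s).toList with hxs
  show _ = PySem.Set.len (xs.foldl pvStep (PySem.Set.empty, PySem.Set.empty)).2
  rw [pv_A_eq, PySem.Set.len]
  congr 1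
  have hperm : ((PySem.Set.ofList xs).filter (fun c => 2 ≤ xs.count c)).Perm
      (xs.foldl pvStep (PySem.Set.empty, PySem.Set.empty)).2 := by
    show (_ : List Char).Perm (xs.foldl pvStep (([] : List Char), ([] : List Char))).2
    rw [List.perm_ext_iff_of_nodup
      (List.Nodup.filter _ (PySem.Set.nodup_ofList _))
      (pv_nodup_final xs _ _ List.nodup_nil)]
    intro c
    rw [pv_mem_final]
    simp [List.mem_filter, PySem.Set.mem_ofList]
    intro h
    rw [← List.count_pos_iff]
    omega
  rw [hperm.length_eq]
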